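-- pv_equiv track=rewrite | github.com/DooDuZ/sparta_python | hanghae/weekly_3rd/prob2.py | solution
-- ===== SOURCE A (Python) =====
-- def solution(params):
--     n, k, sensors = params
--
--     sensors = list(set(sensors))
--     distance = []
--
--     sensors.sort()
--
--     for i in range(1, len(sensors)):
--         distance.append(sensors[i] - sensors[i - 1])
--
--     distance.sort()
--
--     total = 0
--     for i in range(len(distance) - k + 1):
--         total += distance[i]
--
--     return total
-- ===== SOURCE B (Python) =====
-- def solution(params):
--     n, k, sensors = params
--     s = sorted(set(sensors))
--     xs = [b - a for a, b in zip(s, s[1:])]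
--     # iterative three-way-partition selection: sum of the t smallest gaps, no sort of the gap list
--     t = len(xs) - k + 1
--     acc = 0
--     while True:
--         if t <= 0:
--             return acc
--         if t >= len(xs):
--             return acc + sum(xs)
--         p = xs[0]
--         lo = [x for x in xs if x < p]
--         eq = [x for x in xs if x == p]
--         hi = [x for x in xs if x > p]
--         if t <= len(lo):
--             xs = lo
--         elif t <= len(lo) + len(eq):
--             return acc + sum(lo) + p * (t - len(lo))
--         else:
--             acc += sum(lo) + sum(eq)
--             t -= len(lo) + len(eq)
--             xs = hi
-- ===== Notes on version B (the rewrite author's own statement) =====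
-- stated objective: alternative
-- what changed: B never sorts the gap list: it computes the sum of the t smallest gaps by an iterative quickselect-style three-way partition (pivot = first element, recurse into the low or high part with an accumulator), instead of A's sort-all-gaps-then-sum-a-prefix index loop.
import Mathlib
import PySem

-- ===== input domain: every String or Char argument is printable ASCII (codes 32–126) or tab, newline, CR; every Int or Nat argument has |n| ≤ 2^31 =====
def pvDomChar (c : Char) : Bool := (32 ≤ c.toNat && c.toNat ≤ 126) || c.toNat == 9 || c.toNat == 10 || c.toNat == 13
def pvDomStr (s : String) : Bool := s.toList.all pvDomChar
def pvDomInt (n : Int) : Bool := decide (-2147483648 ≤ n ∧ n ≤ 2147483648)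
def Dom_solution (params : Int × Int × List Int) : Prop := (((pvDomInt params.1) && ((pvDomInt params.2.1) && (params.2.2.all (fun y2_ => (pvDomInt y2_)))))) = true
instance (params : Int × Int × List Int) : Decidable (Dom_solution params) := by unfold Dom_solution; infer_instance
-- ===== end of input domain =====

-- B replaces A's sort-the-gaps-and-sum-a-prefix loop by an iterative quickselect-style
-- three-way-partition selection of the t smallest gaps; alternative, not claimed faster.

-- ===== PORT A =====
-- list(set(sensors)) followed by .sort(): the set's hash order is erased by the
-- identity-key sort, so this is exactly sorted over PySem.Set.ofList.
-- pyGetD is exact here: every index reached is in range (second loop: under Pre_, k ≥ 1).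
def solution (params : Int × Int × List Int) : Int :=
  let sensors := PySem.List.sorted (PySem.Set.ofList params.2.2) (fun x => x) false
  let distance := (PySem.List.pyRange 1 (sensors.length : Int) 1).foldl
      (fun acc i => acc ++ [PySem.List.pyGetD sensors i 0 - PySem.List.pyGetD sensors (i - 1) 0]) []
  let distance := PySem.List.sorted distance (fun x => x) false
  (PySem.List.pyRange 0 ((distance.length : Int) - params.2.1 + 1) 1).foldl
      (fun acc i => acc + PySem.List.pyGetD distance i 0) 0

-- ===== PORT B =====
-- Source B's while-loop, as the obvious structural recursion on (xs, t, acc);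
-- xs[0] is headD (the loop body only runs when xs is nonempty).
def smallestSumLoop (xs : List Int) (t : Int) (acc : Int) : Int :=
  if _h1 : t ≤ 0 then acc
  else if _h2 : (xs.length : Int) ≤ t then acc + xs.sum
  else
    let p := xs.headD 0
    let lo := xs.filter (fun x => x < p)
    let eq := xs.filter (fun x => x = p)
    let hi := xs.filter (fun x => p < x)
    if t ≤ (lo.length : Int) then smallestSumLoop lo t acc
    else if t ≤ (lo.length : Int) + (eq.length : Int) then
      acc + lo.sum + p * (t - (lo.length : Int))
    else
      smallestSumLoop hi (t - (lo.length : Int) - (eq.length : Int)) (acc + lo.sum + eq.sum)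
termination_by xs.length
decreasing_by
  all_goals
    have hne : xs ≠ [] := by intro h; subst h; simp at _h2; omega
    simp only [List.length_unattach]
    rw [show xs.length = xs.attach.length from (List.length_attach (l := xs)).symm]
    apply List.length_filter_lt_length_iff_exists.mpr
    refine ⟨⟨xs.headD 0, ?_⟩, List.mem_attach _ _, by simp⟩
    obtain ⟨a, l, rfl⟩ := List.exists_cons_of_ne_nil hne
    simp
-- s[1:] is s.tail; gaps via zip, as in Source B.
def solution_alt (params : Int × Int × List Int) : Int :=
  let s := PySem.List.sorted (PySem.Set.ofList params.2.2) (fun x => x) false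
  let gaps := (s.zip s.tail).map (fun p => p.2 - p.1)
  smallestSumLoop gaps ((gaps.length : Int) - params.2.1 + 1) 0

-- ===== PRECONDITION & SPEC =====
-- A raises IndexError whenever k ≤ 0 (its loop bound len(distance)-k+1 exceeds the list); Pre_ excludes exactly that.
def Pre_solution (params : Int × Int × List Int) : Prop := 1 ≤ params.2.1
instance (params : Int × Int × List Int) : Decidable (Pre_solution params) := by unfold Pre_solution; infer_instance
def pvWitness_solution : (Int × Int × List Int) := (3, 2, [1, 9, 4])

def Spec_solution (params : Int × Int × List Int) (out : Int) : Prop := out = solution_alt params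
instance (params : Int × Int × List Int) (out : Int) : Decidable (Spec_solution params out) := by unfold Spec_solution; infer_instance

-- ===== CLAIM (what is proved, stated in full; the proofs are below) =====
def Claim_equal_solution : Prop := ∀ (params : Int × Int × List Int), Dom_solution params → Pre_solution params → Spec_solution params (solution params)

-- ===== LEMMAS AND PROOFS =====

-- A's gap-building index loop equals B's zip comprehension.
lemma gaps_map_eq (s : List Int) :
    (PySem.List.pyRange 1 (s.length : Int) 1).map
        (fun i => PySem.List.pyGetD s i 0 - PySem.List.pyGetD s (i - 1) 0)
      = (s.zip s.tail).map (fun p => p.2 - p.1) := by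
  apply List.ext_getElem
  · simp [PySem.List.length_pyRange_one, List.length_zip, List.length_tail]
  · intro j h1 h2
    have hj : j + 1 < s.length := by
      have := h1; simp [PySem.List.length_pyRange_one] at this; omega
    simp only [List.getElem_map, List.getElem_zip, List.getElem_tail]
    rw [PySem.List.getElem_pyRange_one]
    have e1 : (1 : Int) + (j : Int) = ((j + 1 : Nat) : Int) := by push_cast; ring
    have e2 : ((j + 1 : Nat) : Int) - 1 = ((j : Nat) : Int) := by push_cast; ring
    rw [e1, e2]
    rw [PySem.List.pyGetD_natCast, PySem.List.pyGetD_natCast]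
    simp [List.getD_eq_getElem?_getD, hj, Nat.lt_of_succ_lt hj]

-- A's summing loop over range(0, M) with M ≤ len d is the sum of the first M elements.
lemma prefix_sum_eq (d : List Int) (M : Int) (hM : M ≤ (d.length : Int)) :
    (PySem.List.pyRange 0 M 1).foldl (fun acc i => acc + PySem.List.pyGetD d i 0) 0
      = (d.take M.toNat).sum := by
  rw [PySem.List.foldl_add, zero_add]
  congr 1
  apply List.ext_getElem
  · simp [PySem.List.length_pyRange_one]
    omega
  · intro j h1 h2
    have hj : j < d.length := by
      have := h1; simp [PySem.List.length_pyRange_one] at this; omega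
    simp only [List.getElem_map, List.getElem_take]
    rw [PySem.List.getElem_pyRange_one]
    have e : (0 : Int) + (j : Int) = ((j : Nat) : Int) := by ring
    rw [e, PySem.List.pyGetD_natCast]
    simp [List.getD_eq_getElem?_getD, hj]

lemma threeway_perm (xs : List Int) (p : Int) :
    (xs.filter (fun x => x < p)
      ++ (xs.filter (fun x => x = p) ++ xs.filter (fun x => p < x))).Perm xs := by
  induction xs with
  | nil => simp
  | cons a tl ih =>
    rcases lt_trichotomy a p with h | h | h
    · simpa [List.filter_cons, h, not_lt_of_gt h, h.ne, lt_asymm h] using ih.cons a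
    · subst h
      simp only [List.filter_cons, lt_irrefl, decide_false, decide_true, if_true]
      exact (List.perm_middle).trans (ih.cons a)
    · simp only [List.filter_cons, decide_eq_true_eq, if_neg (not_lt_of_gt h), if_neg h.ne',
        if_pos h]
      exact ((List.Perm.append_left _ List.perm_middle).trans List.perm_middle).trans (ih.cons a)

-- sorted(xs) splits at a pivot into sorted(lo) ++ (eq ++ sorted(hi)).
lemma sorted_three_split (xs : List Int) (p : Int) :
    PySem.List.sorted xs (fun x => x) false
      = PySem.List.sorted (xs.filter (fun x => x < p)) (fun x => x) false
        ++ (xs.filter (fun x => x = p)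
        ++ PySem.List.sorted (xs.filter (fun x => p < x)) (fun x => x) false) := by
  apply PySem.List.sorted_id_eq_of_perm_of_pairwise
  · refine ((PySem.List.sorted_perm ..).append ((List.Perm.refl _).append (PySem.List.sorted_perm ..))).trans ?_
    exact threeway_perm xs p
  · have hlo : ∀ a ∈ PySem.List.sorted (xs.filter (fun x => x < p)) (fun x => x) false, a < p := by
      intro a ha
      have := (PySem.List.mem_sorted ..).mp ha
      simpa using (List.mem_filter.mp this).2
    have heq : ∀ a ∈ xs.filter (fun x => x = p), a = p := by
      intro a ha; simpa using (List.mem_filter.mp ha).2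
    have hhi : ∀ a ∈ PySem.List.sorted (xs.filter (fun x => p < x)) (fun x => x) false, p < a := by
      intro a ha
      have := (PySem.List.mem_sorted ..).mp ha
      simpa using (List.mem_filter.mp this).2
    rw [List.pairwise_append]
    refine ⟨?_, ?_, ?_⟩
    · simpa using PySem.List.sorted_pairwise (xs := xs.filter (fun x => x < p)) (key := fun x => x)
    · rw [List.pairwise_append]
      refine ⟨?_, ?_, ?_⟩
      · rw [List.eq_replicate_of_mem heq]
        simp [List.pairwise_replicate]
      · simpa using PySem.List.sorted_pairwise (xs := xs.filter (fun x => p < x)) (key := fun x => x)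
      · intro a ha b hb; exact le_of_lt ((heq a ha) ▸ hhi b hb)
    · intro a ha b hb
      rcases List.mem_append.mp hb with hb | hb
      · exact le_of_lt ((heq b hb) ▸ hlo a ha)
      · exact le_of_lt ((hlo a ha).trans (hhi b hb))

-- Source B's loop computes acc + (sum of the t smallest elements of xs).
lemma smallestSumLoop_spec (n : Nat) : ∀ (xs : List Int), xs.length = n → ∀ (t acc : Int),
    smallestSumLoop xs t acc
      = acc + ((PySem.List.sorted xs (fun x => x) false).take t.toNat).sum := by
  induction n using Nat.strong_induction_on with
  | _ n ih =>
    intro xs hlen t acc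
    rw [smallestSumLoop]
    split_ifs with h1 h2
    · simp [Int.toNat_of_nonpos h1]
    · have hle : (PySem.List.sorted xs (fun x => x) false).length ≤ t.toNat := by
        rw [PySem.List.length_sorted]; omega
      rw [List.take_of_length_le hle, (PySem.List.sorted_perm ..).sum_eq]
    · simp only []
      have hne : xs ≠ [] := by intro h; subst h; simp at h2; omega
      have hmem : xs.headD 0 ∈ xs := by
        obtain ⟨a, l, rfl⟩ := List.exists_cons_of_ne_nil hne; simp
      have heqall : ∀ b ∈ xs.filter (fun x => x = xs.headD 0), b = xs.headD 0 := by
        intro b hb; simpa using (List.mem_filter.mp hb).2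
      split_ifs with h3 h4
      · -- t ≤ len lo : recurse into lo
        have hlt : (xs.filter (fun x => x < xs.headD 0)).length < n := by
          rw [← hlen]
          exact List.length_filter_lt_length_iff_exists.mpr ⟨_, hmem, by simp⟩
        rw [ih _ hlt _ rfl t acc, sorted_three_split xs (xs.headD 0),
          List.take_append_of_le_length (by rw [PySem.List.length_sorted]; omega)]
      · -- lo < t ≤ lo + eq : stop inside the equal block
        rw [sorted_three_split xs (xs.headD 0), List.take_append,
          List.take_of_length_le (by rw [PySem.List.length_sorted]; omega),
          List.take_append]
        have hz : t.toNat - (PySem.List.sorted (xs.filter (fun x => x < xs.headD 0)) (fun x => x) false).length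
            - (xs.filter (fun x => x = xs.headD 0)).length = 0 := by
          rw [PySem.List.length_sorted]; omega
        rw [hz, List.take_zero, List.eq_replicate_of_mem heqall, List.take_replicate]
        have hmin : min (t.toNat - (PySem.List.sorted (xs.filter (fun x => x < xs.headD 0)) (fun x => x) false).length)
            (xs.filter (fun x => x = xs.headD 0)).length
            = t.toNat - (PySem.List.sorted (xs.filter (fun x => x < xs.headD 0)) (fun x => x) false).length := by
          rw [PySem.List.length_sorted]; omega
        rw [hmin]
        have hsl : (PySem.List.sorted (xs.filter (fun x => x < xs.headD 0)) (fun x => x) false).sum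
            = (xs.filter (fun x => x < xs.headD 0)).sum := (PySem.List.sorted_perm ..).sum_eq
        have hm : ((t.toNat - (PySem.List.sorted (xs.filter (fun x => x < xs.headD 0)) (fun x => x) false).length : Nat) : Int)
            = t - ((xs.filter (fun x => x < xs.headD 0)).length : Int) := by
          rw [PySem.List.length_sorted]; omega
        simp only [List.sum_append, List.sum_replicate, nsmul_eq_mul, List.sum_nil, add_zero, hsl, hm]
        ring
      · -- t > lo + eq : take all of lo and eq, recurse into hi
        have hlt : (xs.filter (fun x => xs.headD 0 < x)).length < n := by
          rw [← hlen]
          exact List.length_filter_lt_length_iff_exists.mpr ⟨_, hmem, by simp⟩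
        rw [sorted_three_split xs (xs.headD 0), List.take_append,
          List.take_of_length_le (by rw [PySem.List.length_sorted]; omega),
          List.take_append,
          List.take_of_length_le (by rw [PySem.List.length_sorted]; omega),
          ih _ hlt _ rfl _ _]
        have hsl : (PySem.List.sorted (xs.filter (fun x => x < xs.headD 0)) (fun x => x) false).sum
            = (xs.filter (fun x => x < xs.headD 0)).sum := (PySem.List.sorted_perm ..).sum_eq
        have hm : (t - ((xs.filter (fun x => x < xs.headD 0)).length : Int)
              - ((xs.filter (fun x => x = xs.headD 0)).length : Int)).toNat
            = t.toNat - (PySem.List.sorted (xs.filter (fun x => x < xs.headD 0)) (fun x => x) false).length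
              - (xs.filter (fun x => x = xs.headD 0)).length := by
          rw [PySem.List.length_sorted]; omega
        simp only [List.sum_append, hsl, hm]
        ring

-- ===== VERDICT (by name: the statement is the Claim_ definition above) =====
theorem solution_spec : Claim_equal_solution := by
  intro params _ hpre
  obtain ⟨n, k, sensors⟩ := params
  unfold Spec_solution solution solution_alt
  simp only []
  set s := PySem.List.sorted (PySem.Set.ofList sensors) (fun x => x) false with hs
  rw [PySem.List.foldl_append_singleton_eq_map]
  simp only [List.nil_append]
  rw [gaps_map_eq s]
  set g := (s.zip s.tail).map (fun p => p.2 - p.1) with hg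
  set sg := PySem.List.sorted g (fun x => x) false with hsg
  have hlen : sg.length = g.length := PySem.List.length_sorted ..
  have hpre' : (1 : Int) ≤ k := hpre
  have hM : ((sg.length : Int) - k + 1) ≤ (sg.length : Int) := by omega
  rw [prefix_sum_eq sg _ hM]
  rw [smallestSumLoop_spec g.length g rfl]
  rw [hlen, zero_add]
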